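-- pv_equiv track=rewrite | github.com/peterdoyle1717/undented | src/gen_pancakes.py | lattice_points_in_hex
-- ===== SOURCE A (Python) =====
-- def lattice_points_in_hex(a, b, c):
--     """All triangular lattice points inside or on the hex with sides a,b,c.
--
--     Use axial coordinates (q, r) where the point is q*e1 + r*e2,
--     e1 = (1,0), e2 = (1/2, sqrt(3)/2).
--     """
--     # The hex region: walk boundary, find bounding box, test containment
--     # Easier: the hex with sides a,b,c,a,b,c has constraints in axial coords:
--     #   0 <= q <= a+b
--     #   0 <= r <= b+c
--     #   q - r <= a      (from the top-right constraint)
--     #   r - q <= c      (from the bottom-left constraint)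
--     #   q + (b+c-r) <= a+b  =>  q <= r+a  =>  q-r <= a  (same)
--     # Let me think again...
--
--     # Place P0 at origin. The hex vertices in axial (q,r):
--     # P0 = (0,0)
--     # P1 = (a, 0)       [a steps in dir0 = e1]
--     # P2 = (a+b, b)     [b steps in dir1 = e2... wait, dir1 = e1+e2? No.]
--
--     # e1 = (1,0) in axial = dir0
--     # e2 = (0,1) in axial. In Cartesian: (1/2, sqrt(3)/2) = dir1. Good.
--     # dir2 in Cartesian is (-1/2, sqrt(3)/2) = e2 - e1 in axial = (-1, 1).
--
--     # So in axial coords: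
--     # dir0 = (1,0), dir1 = (0,1), dir2 = (-1,1),
--     # dir3 = (-1,0), dir4 = (0,-1), dir5 = (1,-1).
--
--     # Hex vertices in axial:
--     # P0 = (0, 0)
--     # P1 = (a, 0)
--     # P2 = (a, b)       [b steps in dir1=(0,1)]
--     # P3 = (a-c, b+c)   [c steps in dir2=(-1,1)]
--     # P4 = (-c, b+c)    [a steps in dir3=(-1,0)]
--     # P5 = (-c, c)      [b steps in dir4=(0,-1)]
--     # Back to P0: c steps in dir5=(1,-1): (-c+c, c-c) = (0,0). ✓
--
--     # The convex hull of these 6 points. Interior lattice points satisfy: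
--     # Half-plane constraints from each edge.
--     # But simpler: in axial coords, the constraints are:
--     #   r >= 0           (below P0-P1)
--     #   q <= a           (right of P1-P2... no, P1=(a,0), P2=(a,b), so q<=a? Yes for this edge)
--     # Actually let me just enumerate the bounding box and check point-in-polygon.
--
--     vertices = [(0,0), (a,0), (a,b), (a-c,b+c), (-c,b+c), (-c,c)]
--     # Bounding box in axial
--     qs = [v[0] for v in vertices]
--     rs = [v[1] for v in vertices]
--     qmin, qmax = min(qs), max(qs)
--     rmin, rmax = min(rs), max(rs)
--
--     # Point-in-convex-polygon test using cross products
--     def in_hex(q, r):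
--         # Test if (q,r) is inside or on the convex hull of vertices
--         n = len(vertices)
--         for i in range(n):
--             x1, y1 = vertices[i]
--             x2, y2 = vertices[(i+1) % n]
--             cross = (x2-x1)*(r-y1) - (y2-y1)*(q-x1)
--             if cross < -1e-9:
--                 return False
--         return True
--
--     points = []
--     for q in range(qmin, qmax+1):
--         for r in range(rmin, rmax+1):
--             if in_hex(q, r):
--                 points.append((q, r))
--     return points, vertices
-- ===== SOURCE B (Python) =====
-- def lattice_points_in_hex(a, b, c):
--     """All triangular lattice points inside or on the hex with sides a,b,c.
--
--     Column sweep: for each column q of the hexagon the admissible r form the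
--     interval [max(0,-q), min(b+c, a+b-q)], read directly off the hexagon's
--     half-plane description r >= 0, r <= b+c, q+r >= 0, q+r <= a+b.
--     """
--     if a < 0 or b < 0 or c < 0:
--         raise ValueError("side lengths must be nonnegative")
--     vertices = [(0, 0), (a, 0), (a, b), (a - c, b + c), (-c, b + c), (-c, c)]
--     points = []
--     for q in range(-c, a + 1):
--         lo = max(0, -q)
--         hi = min(b + c, a + b - q)
--         for r in range(lo, hi + 1):
--             points.append((q, r))
--     return points, vertices
-- ===== Notes on version B (the rewrite author's own statement) =====
-- stated objective: faster
-- what changed: Replaces A's per-cell six-edge cross-product test over the whole bounding box by a per-column sweep that derives the feasible r-interval of each column from the hexagon's half-plane description and emits it with one range call; Pre_ restricts to nonnegative side lengths, the natural domain of a hexagon, where B instead validates its input and raises ValueError (for a negative side A's vertex chain is non-convex and its cross-product test returns an accidental point set).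
-- outside the precondition, e.g. on lattice_points_in_hex(1, -1, 1): A returns ([], [(0, 0), (1, 0), (1, -1), (0, 0), (-1, 0), (-1, 1)]), B raises
import Mathlib
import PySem

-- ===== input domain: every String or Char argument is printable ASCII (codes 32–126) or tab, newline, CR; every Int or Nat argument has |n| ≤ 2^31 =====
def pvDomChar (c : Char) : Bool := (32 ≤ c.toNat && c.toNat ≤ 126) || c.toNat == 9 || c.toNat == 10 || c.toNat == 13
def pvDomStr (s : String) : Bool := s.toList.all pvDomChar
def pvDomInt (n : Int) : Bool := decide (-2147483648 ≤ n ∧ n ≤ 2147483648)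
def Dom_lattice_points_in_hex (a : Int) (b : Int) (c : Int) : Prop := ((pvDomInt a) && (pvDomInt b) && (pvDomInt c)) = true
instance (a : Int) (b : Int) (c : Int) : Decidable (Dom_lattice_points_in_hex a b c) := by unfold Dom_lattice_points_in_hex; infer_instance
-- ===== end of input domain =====

-- B replaces A's per-cell six-edge cross-product test over the bounding box by a per-column
-- r-interval sweep (objective: faster constant factor; equality proved on nonnegative sides,
-- where B does not raise).

-- ===== PORT A =====
-- the literal vertex list both Pythons build
def pvVerts (a b c : Int) : List (Int × Int) :=
  [(0, 0), (a, 0), (a, b), (a - c, b + c), (-c, b + c), (-c, c)]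

-- in_hex: loop i in range(len(vertices)), cross-product test per edge; the cross product
-- is an integer here, so Python's 'cross < -1e-9' is exactly 'cross < 0' (exact on Int).
def pvInHex (vs : List (Int × Int)) (q r : Int) : Bool :=
  (List.range vs.length).all (fun i =>
    let p1 := vs.getD i (0, 0)
    let p2 := vs.getD ((i + 1) % vs.length) (0, 0)
    !((p2.1 - p1.1) * (r - p1.2) - (p2.2 - p1.2) * (q - p1.1) < 0))

def lattice_points_in_hex (a : Int) (b : Int) (c : Int) : (List (Int × Int)) × (List (Int × Int)) :=
  let vertices := pvVerts a b c
  let qs := vertices.map (fun v => v.1)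
  let rs := vertices.map (fun v => v.2)
  let qmin := (PySem.List.min? qs (fun x => x)).getD 0   -- list is nonempty: the default is never used
  let qmax := (PySem.List.max? qs (fun x => x)).getD 0
  let rmin := (PySem.List.min? rs (fun x => x)).getD 0
  let rmax := (PySem.List.max? rs (fun x => x)).getD 0
  let points := (PySem.List.pyRange qmin (qmax + 1) 1).foldl (fun acc q =>
      (PySem.List.pyRange rmin (rmax + 1) 1).foldl (fun acc2 r =>
        if pvInHex vertices q r then acc2 ++ [(q, r)] else acc2) acc) []
  (points, vertices)

-- ===== PORT B =====
def lattice_points_in_hex_alt (a : Int) (b : Int) (c : Int) : (List (Int × Int)) × (List (Int × Int)) :=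
  if a < 0 ∨ b < 0 ∨ c < 0 then ([], [])   -- Source B raises ValueError here; outside Pre_
  else
    let vertices := pvVerts a b c
    let points := (PySem.List.pyRange (-c) (a + 1) 1).foldl (fun acc q =>
        let lo := max 0 (-q)
        let hi := min (b + c) (a + b - q)
        (PySem.List.pyRange lo (hi + 1) 1).foldl (fun acc2 r => acc2 ++ [(q, r)]) acc) []
    (points, vertices)

-- ===== PRECONDITION & SPEC =====
-- Pre_ restricts to nonnegative side lengths, the natural domain of a hexagon: for a negative
-- side A's vertex chain is non-convex and its cross-product test returns an accidental point
-- set, and B itself raises ValueError there.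
def Pre_lattice_points_in_hex (a : Int) (b : Int) (c : Int) : Prop := 0 ≤ a ∧ 0 ≤ b ∧ 0 ≤ c
instance (a : Int) (b : Int) (c : Int) : Decidable (Pre_lattice_points_in_hex a b c) := by
  unfold Pre_lattice_points_in_hex; infer_instance

def pvWitness_lattice_points_in_hex : Int × Int × Int := (2, 1, 1)

def Spec_lattice_points_in_hex (a : Int) (b : Int) (c : Int) (out : (List (Int × Int)) × (List (Int × Int))) : Prop := out = lattice_points_in_hex_alt a b c
instance (a : Int) (b : Int) (c : Int) (out : (List (Int × Int)) × (List (Int × Int))) : Decidable (Spec_lattice_points_in_hex a b c out) := by unfold Spec_lattice_points_in_hex; infer_instance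

-- ===== CLAIM =====
def Claim_equal_lattice_points_in_hex : Prop := ∀ (a : Int) (b : Int) (c : Int), Dom_lattice_points_in_hex a b c → Pre_lattice_points_in_hex a b c → Spec_lattice_points_in_hex a b c (lattice_points_in_hex a b c)

-- ===== LEMMAS AND PROOFS =====

lemma pvAtom_pos {k : Int} (h : 0 < k) (x : Int) : (0 ≤ k * x) ↔ 0 ≤ x :=
  mul_nonneg_iff_of_pos_left h

-- the six half-plane constraints A's cross-product loop tests, written out
lemma pvInHex_iff (a b c q r : Int) :
    pvInHex (pvVerts a b c) q r = true ↔
      (0 ≤ a * r ∧ 0 ≤ b * (a - q) ∧ 0 ≤ c * (a + b - q - r) ∧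
       0 ≤ a * (b + c - r) ∧ 0 ≤ b * (q + c) ∧ 0 ≤ c * (q + r)) := by
  show (List.range 6).all _ = true ↔ _
  rw [List.all_eq_true]
  constructor
  · intro h
    have h0 := h 0 (by simp)
    have h1 := h 1 (by simp)
    have h2 := h 2 (by simp)
    have h3 := h 3 (by simp)
    have h4 := h 4 (by simp)
    have h5 := h 5 (by simp)
    simp only [pvVerts, List.getD, List.length_cons, List.length_nil] at h0 h1 h2 h3 h4 h5
    simp at h0 h1 h2 h3 h4 h5
    exact ⟨by nlinarith, by nlinarith, by nlinarith, by nlinarith, by nlinarith, by nlinarith⟩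
  · rintro ⟨x0, x1, x2, x3, x4, x5⟩ i hi
    simp only [List.mem_range] at hi
    interval_cases i <;> simp [pvVerts] <;> nlinarith

-- filtering a unit-step range by an interval predicate yields the clipped range
lemma pvFilter_interval (m n lo hi : Int) (P : Int → Bool)
    (hP : ∀ r, m ≤ r → r < n → (P r = true ↔ (lo ≤ r ∧ r ≤ hi))) :
    (PySem.List.pyRange m n 1).filter P = PySem.List.pyRange (max lo m) (min hi (n - 1) + 1) 1 := by
  refine List.Perm.eq_of_pairwise (le := (· < ·))
    (fun a b _ _ h1 h2 => absurd h2 (not_lt.2 h1.le)) ?_ ?_ ?_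
  · exact (PySem.List.pairwise_lt_pyRange_one m n).sublist List.filter_sublist
  · exact PySem.List.pairwise_lt_pyRange_one _ _
  · rw [List.perm_ext_iff_of_nodup ((PySem.List.nodup_pyRange_one m n).filter _)
      (PySem.List.nodup_pyRange_one _ _)]
    intro x
    simp only [List.mem_filter, PySem.List.mem_pyRange_one]
    constructor
    · rintro ⟨⟨hx1, hx2⟩, hx3⟩
      have := (hP x hx1 hx2).1 hx3
      omega
    · rintro ⟨hx1, hx2⟩
      have h1 : m ≤ x := by omega
      have h2 : x < n := by omega
      exact ⟨⟨h1, h2⟩, (hP x h1 h2).2 (by omega)⟩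

-- one column of A's scan equals B's clipped interval, for nonnegative sides and q in range
lemma pvColumn (a b c q : Int) (ha : 0 ≤ a) (hb : 0 ≤ b) (hc : 0 ≤ c)
    (hq1 : -c ≤ q) (hq2 : q ≤ a) :
    (PySem.List.pyRange 0 (b + c + 1) 1).filter (fun r => pvInHex (pvVerts a b c) q r)
      = PySem.List.pyRange (max 0 (-q)) (min (b + c) (a + b - q) + 1) 1 := by
  by_cases hcp : 0 < c
  · have hP : ∀ r : Int, 0 ≤ r → r < b + c + 1 →
        ((fun r => pvInHex (pvVerts a b c) q r) r = true ↔ (-q ≤ r ∧ r ≤ a + b - q)) := by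
      intro r hr1 hr2
      simp only
      rw [pvInHex_iff]
      constructor
      · rintro ⟨-, -, h3, -, -, h6⟩
        rw [pvAtom_pos hcp] at h3 h6
        omega
      · rintro ⟨hx1, hx2⟩
        refine ⟨mul_nonneg ha hr1, mul_nonneg hb (by omega), ?_,
          mul_nonneg ha (by omega), mul_nonneg hb (by omega), ?_⟩
        · rw [pvAtom_pos hcp]; omega
        · rw [pvAtom_pos hcp]; omega
    rw [pvFilter_interval _ _ _ _ _ hP]
    congr 1 <;> omega
  · have hc0 : c = 0 := by omega
    have hP : ∀ r : Int, 0 ≤ r → r < b + c + 1 →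
        ((fun r => pvInHex (pvVerts a b c) q r) r = true ↔ (0 ≤ r ∧ r ≤ b + c)) := by
      intro r hr1 hr2
      simp only
      rw [pvInHex_iff]
      constructor
      · intro _; omega
      · rintro ⟨hx1, hx2⟩
        exact ⟨mul_nonneg ha hr1, mul_nonneg hb (by omega),
          by rw [hc0]; simp, mul_nonneg ha (by omega), mul_nonneg hb (by omega),
          by rw [hc0]; simp⟩
    rw [pvFilter_interval _ _ _ _ _ hP]
    congr 1 <;> omega

-- ===== VERDICT =====
theorem lattice_points_in_hex_spec : Claim_equal_lattice_points_in_hex := by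
  intro a b c _ hpre
  obtain ⟨ha, hb, hc⟩ := hpre
  unfold Spec_lattice_points_in_hex lattice_points_in_hex lattice_points_in_hex_alt
  rw [if_neg (by omega : ¬(a < 0 ∨ b < 0 ∨ c < 0))]
  refine congrArg (fun p => (p, pvVerts a b c)) ?_
  have hqmin : (PySem.List.min? ((pvVerts a b c).map (fun v => v.1)) (fun x => x)).getD 0 = -c := by
    simp [pvVerts, PySem.List.min?_id_cons, List.foldl]; omega
  have hqmax : (PySem.List.max? ((pvVerts a b c).map (fun v => v.1)) (fun x => x)).getD 0 = a := by
    simp [pvVerts, PySem.List.max?_id_cons, List.foldl]; omega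
  have hrmin : (PySem.List.min? ((pvVerts a b c).map (fun v => v.2)) (fun x => x)).getD 0 = 0 := by
    simp [pvVerts, PySem.List.min?_id_cons, List.foldl]; omega
  have hrmax : (PySem.List.max? ((pvVerts a b c).map (fun v => v.2)) (fun x => x)).getD 0 = b + c := by
    simp [pvVerts, PySem.List.max?_id_cons, List.foldl]; omega
  rw [hqmin, hqmax, hrmin, hrmax]
  apply PySem.List.foldl_congr_mem
  intro acc q hq
  rw [PySem.List.mem_pyRange_one] at hq
  rw [PySem.List.foldl_append_if (fun r => pvInHex (pvVerts a b c) q r) (fun r => ((q, r) : Int × Int)),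
    PySem.List.foldl_append_singleton_eq_map,
    pvColumn a b c q ha hb hc (by omega) (by omega)]
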